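-- pv_equiv track=rewrite | github.com/jacurick19/AxisAndAllies_Probability_Calculator | AAAWinProbabilities.py | getGoodSubSums
-- ===== SOURCE A (Python) =====
-- def getGoodSubSums(unit_array, numberOfHits):
--     goodSubSums = []
--     retval = []
--     for val in range(unit_array[0] + 1):
--         if sum(unit_array[1:]) >= (numberOfHits - val) and len(unit_array[1:]) > 0:
--             retval = getGoodSubSums(unit_array[1:], numberOfHits - val)
--         for ar in retval:
--             ar.insert(0, val)
--             goodSubSums.append(ar)
--             #base case
--         if len(unit_array) == 1 and val == numberOfHits:
--             goodSubSums.append([val])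
--     return goodSubSums
-- ===== SOURCE B (Python) =====
-- def getGoodSubSums(unit_array, numberOfHits):
--     partials = [([], 0)]
--     rest = sum(unit_array)
--     for u in unit_array:
--         rest -= u
--         partials = [(p + [v], s + v)
--                     for p, s in partials
--                     for v in range(max(0, numberOfHits - s - rest),
--                                    min(u, numberOfHits - s) + 1)]
--     return [p for p, s in partials if s == numberOfHits]
-- ===== Notes on version B (the rewrite author's own statement) =====
-- stated objective: alternative
-- what changed: A's recursion over array suffixes with a stateful retval carried across loop iterations is replaced by a single iterative left-to-right pass that grows (partial combination, partial sum) pairs, ranging each step only over values that can still reach numberOfHits given the remaining capacity, then filters by the final sum.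
import Mathlib
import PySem

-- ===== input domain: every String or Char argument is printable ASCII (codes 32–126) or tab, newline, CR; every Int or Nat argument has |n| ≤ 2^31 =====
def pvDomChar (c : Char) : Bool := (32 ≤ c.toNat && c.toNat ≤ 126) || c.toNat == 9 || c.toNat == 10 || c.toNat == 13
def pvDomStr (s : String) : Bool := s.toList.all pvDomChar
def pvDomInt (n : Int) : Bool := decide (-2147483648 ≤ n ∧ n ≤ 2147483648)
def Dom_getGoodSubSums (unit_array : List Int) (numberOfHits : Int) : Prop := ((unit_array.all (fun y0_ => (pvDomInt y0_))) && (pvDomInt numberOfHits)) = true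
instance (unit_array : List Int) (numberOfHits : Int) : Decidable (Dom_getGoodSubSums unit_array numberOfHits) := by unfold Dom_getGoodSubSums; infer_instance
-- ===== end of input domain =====

-- B replaces A's recursion over suffixes with a stateful retval by one iterative left-to-right pass growing (partial combo, sum) pairs over pruned value ranges, then a final sum filter (alternative algorithm; same results and order).


-- ===== PORT A =====
-- literal transliteration of A: loop over range(unit_array[0]+1) threading (goodSubSums, retval);
-- pvStepA is the named loop body; the empty list (where Python raises IndexError) is excluded by Pre_ and mapped to [].
def pvStepA (rec : Int → List (List Int)) (rest : List Int) (numberOfHits : Int)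
    (st : List (List Int) × List (List Int)) (val : Int) : List (List Int) × List (List Int) :=
  let retval := if rest.sum ≥ numberOfHits - val ∧ 0 < rest.length then rec (numberOfHits - val) else st.2
  let good := st.1 ++ retval.map (fun ar => val :: ar)
  let good := if rest.length + 1 = 1 ∧ val = numberOfHits then good ++ [[val]] else good
  (good, retval)

def getGoodSubSums : List Int → Int → List (List Int)
  | [], _ => []
  | u0 :: rest, numberOfHits =>
      ((PySem.List.pyRange 0 (u0 + 1) 1).foldl
        (pvStepA (fun h' => getGoodSubSums rest h') rest numberOfHits) ([], [])).1
  termination_by ua _ => ua.length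
  decreasing_by simp

-- ===== PORT B =====
-- transliteration of B: one pass over unit_array growing (partial combo, its sum) pairs,
-- each step ranging only over values that can still reach numberOfHits; final sum filter.
def pvStepB (numberOfHits : Int) (st : List (List Int × Int) × Int) (u : Int) :
    List (List Int × Int) × Int :=
  let rest := st.2 - u
  (st.1.flatMap (fun ps =>
      (PySem.List.pyRange (max 0 (numberOfHits - ps.2 - rest)) (min u (numberOfHits - ps.2) + 1) 1).map
        (fun v => (ps.1 ++ [v], ps.2 + v))),
   rest)

def getGoodSubSums_alt (unit_array : List Int) (numberOfHits : Int) : List (List Int) :=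
  (((unit_array.foldl (pvStepB numberOfHits) ([([], 0)], unit_array.sum)).1.filter
      (fun ps => ps.2 == numberOfHits)).map (·.1))

-- ===== PRECONDITION & SPEC =====
-- Pre_ excludes only the empty unit_array, on which Python A raises IndexError (unit_array[0]).
def Pre_getGoodSubSums (unit_array : List Int) (numberOfHits : Int) : Prop := unit_array ≠ []
instance (unit_array : List Int) (numberOfHits : Int) : Decidable (Pre_getGoodSubSums unit_array numberOfHits) := by unfold Pre_getGoodSubSums; infer_instance
def pvWitness_getGoodSubSums : List Int × Int := ([2, 1], 2)

def Spec_getGoodSubSums (unit_array : List Int) (numberOfHits : Int) (out : List (List Int)) : Prop := out = getGoodSubSums_alt unit_array numberOfHits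
instance (unit_array : List Int) (numberOfHits : Int) (out : List (List Int)) : Decidable (Spec_getGoodSubSums unit_array numberOfHits out) := by unfold Spec_getGoodSubSums; infer_instance

-- ===== CLAIM (what is proved, stated in full; the proofs are below) =====
def Claim_equal_getGoodSubSums : Prop := ∀ (unit_array : List Int) (numberOfHits : Int), Dom_getGoodSubSums unit_array numberOfHits → Pre_getGoodSubSums unit_array numberOfHits → Spec_getGoodSubSums unit_array numberOfHits (getGoodSubSums unit_array numberOfHits)

-- ===== LEMMAS AND PROOFS =====

-- the recursive model of the full cartesian product (proof-only helper)
def pvP : List Int → List (List Int)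
  | [] => [[]]
  | u :: rest => (PySem.List.pyRange 0 (u + 1) 1).flatMap (fun v => (pvP rest).map (v :: ·))

-- per-iteration emission of A's loop
def pvG (rest : List Int) (h val : Int) : List (List Int) :=
  if rest.sum ≥ h - val ∧ 0 < rest.length then (getGoodSubSums rest (h - val)).map (val :: ·)
  else if rest.length + 1 = 1 ∧ val = h then [[val]] else []

lemma flatMap_congr_mem {α β : Type} (l : List α) (f g : α → List β)
    (h : ∀ a ∈ l, f a = g a) : l.flatMap f = l.flatMap g := by
  induction l with
  | nil => rfl
  | cons x xs ih =>
      simp only [List.flatMap_cons]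
      rw [h x (by simp), ih (fun a ha => h a (by simp [ha]))]

lemma flatMap_eq_nil_of_mem {α β : Type} (l : List α) (g : α → List β)
    (h : ∀ a ∈ l, g a = []) : l.flatMap g = [] := by
  rw [flatMap_congr_mem l g (fun _ => []) h]
  simp

-- the pruned search tree that B explores (proof-only helper)
def pvPrune (h : Int) : List Int → Int → List (List Int)
  | [], _ => [[]]
  | u :: rest, s =>
      (PySem.List.pyRange (max 0 (h - s - rest.sum)) (min u (h - s) + 1) 1).flatMap
        (fun v => (pvPrune h rest (s + v)).map (v :: ·))

lemma mem_pvP_sum_le {ua : List Int} {w : List Int} (hw : w ∈ pvP ua) : w.sum ≤ ua.sum := by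
  induction ua generalizing w with
  | nil => simp [pvP] at hw; simp [hw]
  | cons u rest ih =>
      simp only [pvP, List.mem_flatMap, List.mem_map] at hw
      obtain ⟨v, hv, w', hw', rfl⟩ := hw
      rw [PySem.List.mem_pyRange_one] at hv
      have := ih hw'
      simp only [List.sum_cons]
      omega

lemma mem_pvP_sum_nonneg {ua : List Int} {w : List Int} (hw : w ∈ pvP ua) : 0 ≤ w.sum := by
  induction ua generalizing w with
  | nil => simp [pvP] at hw; simp [hw]
  | cons u rest ih =>
      simp only [pvP, List.mem_flatMap, List.mem_map] at hw
      obtain ⟨v, hv, w', hw', rfl⟩ := hw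
      rw [PySem.List.mem_pyRange_one] at hv
      have := ih hw'
      simp only [List.sum_cons]
      omega

lemma flatMap_prune {β : Type} (u lo hi : Int) (g : Int → List β)
    (h0 : 0 ≤ lo) (h1 : hi ≤ u)
    (hg : ∀ v, 0 ≤ v → v ≤ u → (v < lo ∨ hi < v) → g v = []) :
    (PySem.List.pyRange 0 (u + 1) 1).flatMap g = (PySem.List.pyRange lo (hi + 1) 1).flatMap g := by
  by_cases hle : lo ≤ hi
  · rw [PySem.List.pyRange_one_append 0 lo (u + 1) h0 (by omega),
        PySem.List.pyRange_one_append lo (hi + 1) (u + 1) (by omega) (by omega),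
        List.flatMap_append, List.flatMap_append]
    rw [flatMap_eq_nil_of_mem (PySem.List.pyRange 0 lo 1) g (fun v hv => by
          rw [PySem.List.mem_pyRange_one] at hv
          exact hg v hv.1 (by omega) (Or.inl hv.2)),
        flatMap_eq_nil_of_mem (PySem.List.pyRange (hi + 1) (u + 1) 1) g (fun v hv => by
          rw [PySem.List.mem_pyRange_one] at hv
          exact hg v (by omega) (by omega) (Or.inr (by omega)))]
    simp
  · rw [PySem.List.pyRange_one_eq_nil (show hi + 1 ≤ lo by omega)]
    rw [flatMap_eq_nil_of_mem (PySem.List.pyRange 0 (u + 1) 1) g (fun v hv => by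
          rw [PySem.List.mem_pyRange_one] at hv
          exact hg v hv.1 (by omega) (by omega))]
    simp

lemma prune_eq (h : Int) : ∀ (ua : List Int) (s : Int), ua ≠ [] →
    pvPrune h ua s = (pvP ua).filter (fun w => s + w.sum == h) := by
  intro ua
  induction ua with
  | nil => intro s hne; exact absurd rfl hne
  | cons u rest ih =>
      intro s _
      have hfilt : (pvP (u :: rest)).filter (fun w => s + w.sum == h)
          = (PySem.List.pyRange 0 (u + 1) 1).flatMap
              (fun v => ((pvP rest).filter (fun w => s + v + w.sum == h)).map (v :: ·)) := by
        simp only [pvP]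
        rw [List.filter_flatMap]
        apply flatMap_congr_mem
        intro v _
        rw [List.filter_map]
        congr 1
        apply List.filter_congr
        intro w _
        simp only [Function.comp, List.sum_cons]
        rw [Bool.eq_iff_iff]
        simp only [beq_iff_eq]
        omega
      rw [hfilt]
      rw [flatMap_prune u (max 0 (h - s - rest.sum)) (min u (h - s))
            (fun v => ((pvP rest).filter (fun w => s + v + w.sum == h)).map (v :: ·))
            (by omega) (by omega)
            (fun v hv0 hvu hout => by
              rw [List.map_eq_nil_iff, List.filter_eq_nil_iff]
              intro w hw
              have h1 := mem_pvP_sum_le hw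
              have h2 := mem_pvP_sum_nonneg hw
              simp only [beq_iff_eq]
              omega)]
      show pvPrune h (u :: rest) s = _
      simp only [pvPrune]
      apply flatMap_congr_mem
      intro v hv
      rw [PySem.List.mem_pyRange_one] at hv
      by_cases hnil : rest = []
      · subst hnil
        have hveq2 : s + v = h := by
          simp only [List.sum_nil] at hv
          omega
        simp [pvPrune, pvP, hveq2]
      · rw [ih (s + v) hnil]

lemma alt_fold (h : Int) : ∀ (ua : List Int) (parts : List (List Int × Int)),
    (ua.foldl (pvStepB h) (parts, ua.sum)).1
      = parts.flatMap (fun ps => (pvPrune h ua ps.2).map (fun w => (ps.1 ++ w, ps.2 + w.sum))) := by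
  intro ua
  induction ua with
  | nil =>
      intro parts
      simp [pvPrune]
  | cons u rest ih =>
      intro parts
      rw [List.foldl_cons]
      have hstep : pvStepB h (parts, (u :: rest).sum) u
          = (parts.flatMap (fun ps =>
              (PySem.List.pyRange (max 0 (h - ps.2 - rest.sum)) (min u (h - ps.2) + 1) 1).map
                (fun v => (ps.1 ++ [v], ps.2 + v))), rest.sum) := by
        simp only [pvStepB, List.sum_cons]
        rw [add_sub_cancel_left]
      rw [hstep, ih]
      rw [List.flatMap_assoc]
      apply flatMap_congr_mem
      intro ps _
      rw [List.flatMap_map]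
      show _ = ((PySem.List.pyRange (max 0 (h - ps.2 - rest.sum)) (min u (h - ps.2) + 1) 1).flatMap
          (fun v => (pvPrune h rest (ps.2 + v)).map (v :: ·))).map (fun w => (ps.1 ++ w, ps.2 + w.sum))
      rw [List.map_flatMap]
      apply flatMap_congr_mem
      intro v _
      simp only [List.map_map]
      apply List.map_congr_left
      intro w _
      simp [List.sum_cons, List.append_assoc, Prod.mk.injEq]
      omega

lemma alt_eq_filter (ua : List Int) (h : Int) (hne : ua ≠ []) :
    getGoodSubSums_alt ua h = (pvP ua).filter (fun c => c.sum == h) := by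
  unfold getGoodSubSums_alt
  rw [alt_fold h ua [([], 0)]]
  simp only [List.flatMap_cons, List.flatMap_nil, List.append_nil, List.nil_append, zero_add]
  rw [prune_eq h ua 0 hne, List.filter_map, List.map_map, List.filter_filter]
  have hid : List.map ((fun ps : List Int × Int => ps.1) ∘ fun w : List Int => (w, w.sum))
      = List.map (id : List Int → List Int) := rfl
  rw [hid, List.map_id]
  apply List.filter_congr
  intro w _
  simp only [Function.comp]
  rw [Bool.eq_iff_iff]
  simp only [Bool.and_eq_true, beq_iff_eq]
  omega

lemma foldl_emit (rest : List Int) (h : Int) :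
    ∀ (n : ℕ) (a : Int) (good r : List (List Int)),
    (¬ (rest.sum ≥ h - a ∧ 0 < rest.length) → r = []) →
    ((PySem.List.pyRange a (a + n) 1).foldl
      (pvStepA (fun h' => getGoodSubSums rest h') rest h) (good, r)).1
    = good ++ (PySem.List.pyRange a (a + n) 1).flatMap (pvG rest h) := by
  intro n
  induction n with
  | zero =>
      intro a good r _
      rw [PySem.List.pyRange_one_eq_nil (by omega)]
      simp
  | succ m ih =>
      intro a good r hr
      have hcast : ((m + 1 : ℕ) : Int) = (m : ℕ) + 1 := by push_cast; ring
      rw [hcast]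
      rw [PySem.List.pyRange_one_cons (by omega : a < a + ((m : ℕ) + 1)),
          List.foldl_cons, List.flatMap_cons]
      have harith : a + 1 + (m : ℕ) = a + ((m : ℕ) + 1) := by ring
      by_cases hc : rest.sum ≥ h - a ∧ 0 < rest.length
      · have hbase : ¬ (rest.length + 1 = 1 ∧ a = h) := by
          intro hb; omega
        have happ : pvStepA (fun h' => getGoodSubSums rest h') rest h (good, r) a
            = (good ++ (getGoodSubSums rest (h - a)).map (fun ar => a :: ar),
               getGoodSubSums rest (h - a)) := by
          simp only [pvStepA]
          rw [if_pos hc, if_neg hbase]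
        rw [happ]
        have hstep := ih (a + 1)
          (good ++ ((getGoodSubSums rest (h - a)).map (fun ar => a :: ar)))
          (getGoodSubSums rest (h - a))
          (by intro hnc; exfalso; exact hnc ⟨by omega, hc.2⟩)
        rw [harith] at hstep
        rw [hstep, pvG, if_pos hc]
        simp [List.append_assoc]
      · have hr0 : r = [] := hr hc
        subst hr0
        by_cases hb : rest.length + 1 = 1 ∧ a = h
        · have happ : pvStepA (fun h' => getGoodSubSums rest h') rest h (good, []) a
              = (good ++ [[a]], []) := by
            simp only [pvStepA]
            rw [if_neg hc, if_pos hb]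
            simp
          rw [happ]
          have hstep := ih (a + 1) (good ++ [[a]]) [] (by intro _; rfl)
          rw [harith] at hstep
          rw [hstep, pvG, if_neg hc, if_pos hb]
          simp [List.append_assoc]
        · have happ : pvStepA (fun h' => getGoodSubSums rest h') rest h (good, []) a
              = (good, []) := by
            simp only [pvStepA]
            rw [if_neg hc, if_neg hb]
            simp
          rw [happ]
          have hstep := ih (a + 1) good [] (by intro _; rfl)
          rw [harith] at hstep
          rw [hstep, pvG, if_neg hc, if_neg hb]
          simp

lemma A_eq_filter : ∀ (ua : List Int) (h : Int), ua ≠ [] →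
    getGoodSubSums ua h = (pvP ua).filter (fun c => c.sum == h) := by
  intro ua
  induction ua with
  | nil => intro h hne; exact absurd rfl hne
  | cons u0 rest ih =>
      intro h _
      have hfold := foldl_emit rest h (u0 + 1 - 0).toNat 0 [] [] (by intro _; rfl)
      have hrange : (0 : Int) + ((u0 + 1 - 0).toNat : Int) = max (u0 + 1) 0 := by omega
      rw [hrange] at hfold
      have hmax : PySem.List.pyRange 0 (max (u0 + 1) 0) 1 = PySem.List.pyRange 0 (u0 + 1) 1 := by
        by_cases hle : 0 ≤ u0 + 1
        · rw [max_eq_left hle]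
        · rw [PySem.List.pyRange_one_eq_nil (by omega), PySem.List.pyRange_one_eq_nil (by omega)]
      rw [hmax] at hfold
      rw [getGoodSubSums, hfold]
      simp only [List.nil_append, pvP]
      rw [List.filter_flatMap]
      apply flatMap_congr_mem
      intro v hv
      rw [List.filter_map]
      by_cases hnil : rest = []
      · subst hnil
        simp only [pvG, pvP]
        have hclen : ¬ ((List.sum ([] : List Int) ≥ h - v) ∧ 0 < List.length ([] : List Int)) := by simp
        rw [if_neg hclen]
        by_cases hvh : v = h
        · subst hvh
          simp
        · rw [if_neg (by simp [hvh])]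
          simp [Function.comp, hvh]
      · have hrne : rest ≠ [] := hnil
        have hlen : 0 < rest.length := List.length_pos_of_ne_nil hrne
        simp only [pvG]
        rw [if_neg (by omega : ¬ (rest.length + 1 = 1 ∧ v = h))]
        by_cases hc : rest.sum ≥ h - v ∧ 0 < rest.length
        · rw [if_pos hc, ih (h - v) hrne]
          congr 1
          apply List.filter_congr
          intro w _
          simp only [Function.comp, List.sum_cons]
          rw [Bool.eq_iff_iff]
          simp only [beq_iff_eq]
          omega
        · rw [if_neg hc]
          symm
          rw [List.map_eq_nil_iff, List.filter_eq_nil_iff]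
          intro w hw
          have hsle := mem_pvP_sum_le hw
          have hge : ¬ rest.sum ≥ h - v := fun hgood => hc ⟨hgood, hlen⟩
          simp only [Function.comp, List.sum_cons, beq_iff_eq]
          omega

-- ===== VERDICT (by name: the statement is the Claim_ definition above) =====
theorem getGoodSubSums_spec : Claim_equal_getGoodSubSums := by
  intro ua h _ hpre
  show getGoodSubSums ua h = getGoodSubSums_alt ua h
  rw [A_eq_filter ua h hpre, alt_eq_filter ua h hpre]
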